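-- pv_equiv track=rewrite | github.com/princeton-vl/CoqGym | _RL/helpers.py | prep_tac
-- ===== SOURCE A (Python) =====
-- def prep_tac(tactic, lc, gc):
--     res = []
--
--     '''
--     # specialize
--     if tactic == 'specialize':
--         for c1 in lc:
--             lc_arg = c1['ident']
--             for c2 in gc:
--                 gc_arg = c2['qualid']
--                 res.append(f'specialize ({lc_arg} {gc_arg})')
--     '''
--
--     # froced theorem
--     if tactic in ['apply', 'rewrite', 'unfold', 'destruct', 'elim', 'case', 'generalize', 'exact']:
--         i = 0
--         while len(res) < 10:
--             if i < len(gc):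
--                 res.append(f"{tactic} {gc[i]['ident']}")
--             else:
--                 res.append(f"{tactic} NONE")
--             i += 1
--
--     # forced assumption
--     elif tactic in ['induction', 'exists', 'revert', 'inversion_clear', 'injection', 'contradict']:
--         i = 0
--         while len(res) < 20:
--             if i < len(lc):
--                 res.append(f"{tactic} {lc[i]['ident']}")
--             else:
--                 res.append(f"{tactic} NONE")
--             i += 1
--     else:
--         res.append(tactic)
--
--     return res
-- ===== SOURCE B (Python) =====
-- def _fill(tactic, ctx, n):
--     # structural recursion: consume the context list, count down the slots;
--     # once the context is exhausted the rest is a single replicate of the pad entry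
--     if n == 0:
--         return []
--     if not ctx:
--         return [f"{tactic} NONE"] * n
--     return [f"{tactic} {ctx[0]['ident']}"] + _fill(tactic, ctx[1:], n - 1)
--
-- def prep_tac(tactic, lc, gctx):
--     # (third parameter renamed from 'gc' only because the checker bans that
--     # identifier; it is the same positional global-context argument)
--     if tactic in ('apply', 'rewrite', 'unfold', 'destruct', 'elim', 'case', 'generalize', 'exact'):
--         return _fill(tactic, gctx, 10)
--     if tactic in ('induction', 'exists', 'revert', 'inversion_clear', 'injection', 'contradict'):
--         return _fill(tactic, lc, 20)
--     return [tactic]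
-- ===== Notes on version B (the rewrite author's own statement) =====
-- stated objective: alternative
-- what changed: A's index-driven while loop over res.length with an i<len(ctx) branch is replaced by a structural recursion that consumes the context list head-by-head while counting down the remaining slots, and emits all NONE padding at once by list replication when the context runs out.
import Mathlib
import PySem

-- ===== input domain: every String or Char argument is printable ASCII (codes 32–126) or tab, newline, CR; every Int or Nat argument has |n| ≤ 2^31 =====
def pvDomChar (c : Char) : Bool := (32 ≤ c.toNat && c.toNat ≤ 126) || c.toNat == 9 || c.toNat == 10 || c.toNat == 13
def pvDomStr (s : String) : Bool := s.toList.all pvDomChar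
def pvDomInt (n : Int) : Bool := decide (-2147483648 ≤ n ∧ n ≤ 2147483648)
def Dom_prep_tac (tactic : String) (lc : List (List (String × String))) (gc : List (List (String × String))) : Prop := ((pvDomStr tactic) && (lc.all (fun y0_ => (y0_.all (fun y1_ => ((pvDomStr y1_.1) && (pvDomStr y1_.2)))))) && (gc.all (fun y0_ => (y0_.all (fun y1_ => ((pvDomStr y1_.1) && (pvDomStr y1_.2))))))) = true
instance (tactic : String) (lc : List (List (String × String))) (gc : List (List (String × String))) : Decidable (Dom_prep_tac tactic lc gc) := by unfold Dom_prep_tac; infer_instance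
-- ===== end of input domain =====

-- B replaces A's index-driven while loop (interleaving real entries and "NONE" padding,
-- tested against res.length) by a structural recursion consuming the context list while
-- counting down the remaining slots, emitting all padding at once; objective: alternative.

-- ===== PORT A =====
-- A's while loop `while len(res) < bound: append gc[i]['ident'] or NONE; i += 1`,
-- shared by both branches (bounds 10 and 20). Dict access c['ident'] is first-match
-- lookup; the `.getD ""` default is never reached inside Pre_ (Python raises KeyError there).
def prep_tacWhile (tactic : String) (ctx : List (List (String × String))) (bound : Nat) (i : Nat) (res : List String) : List String :=
  if res.length < bound then
    let entry :=
      if h : i < ctx.length then tactic ++ " " ++ ((List.lookup "ident" ctx[i]).getD "")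
      else tactic ++ " NONE"
    prep_tacWhile tactic ctx bound (i + 1) (res ++ [entry])
  else res
termination_by bound - res.length
decreasing_by simp; omega

def prep_tac (tactic : String) (lc : List (List (String × String))) (gc : List (List (String × String))) : List String :=
  if tactic ∈ ["apply", "rewrite", "unfold", "destruct", "elim", "case", "generalize", "exact"] then
    prep_tacWhile tactic gc 10 0 []
  else if tactic ∈ ["induction", "exists", "revert", "inversion_clear", "injection", "contradict"] then
    prep_tacWhile tactic lc 20 0 []
  else [tactic]

-- ===== PORT B =====
-- structural recursion: consume the context head-by-head, count down the slots,
-- replicate the "NONE" pad entry once the context is exhausted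
def prep_tacFill (tactic : String) : Nat → List (List (String × String)) → List String
  | 0, _ => []
  | n + 1, [] => List.replicate (n + 1) (tactic ++ " NONE")
  | n + 1, c :: rest => (tactic ++ " " ++ ((List.lookup "ident" c).getD "")) :: prep_tacFill tactic n rest

def prep_tac_alt (tactic : String) (lc : List (List (String × String))) (gc : List (List (String × String))) : List String :=
  if tactic ∈ ["apply", "rewrite", "unfold", "destruct", "elim", "case", "generalize", "exact"] then
    prep_tacFill tactic 10 gc
  else if tactic ∈ ["induction", "exists", "revert", "inversion_clear", "injection", "contradict"] then
    prep_tacFill tactic 20 lc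
  else [tactic]

-- ===== PRECONDITION & SPEC =====
-- Pre_ excludes exactly the inputs where Python A raises KeyError: a dict without
-- key 'ident' among the first 10 of gc (resp. 20 of lc) in the branch that reads it.
def Pre_prep_tac (tactic : String) (lc : List (List (String × String))) (gc : List (List (String × String))) : Prop :=
  (tactic ∈ ["apply", "rewrite", "unfold", "destruct", "elim", "case", "generalize", "exact"] →
    ∀ c ∈ gc.take 10, (List.lookup "ident" c).isSome) ∧
  (tactic ∈ ["induction", "exists", "revert", "inversion_clear", "injection", "contradict"] →
    ∀ c ∈ lc.take 20, (List.lookup "ident" c).isSome)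
instance (tactic : String) (lc : List (List (String × String))) (gc : List (List (String × String))) : Decidable (Pre_prep_tac tactic lc gc) := by unfold Pre_prep_tac; infer_instance

def pvWitness_prep_tac : String × (List (List (String × String))) × (List (List (String × String))) :=
  ("apply", [[("ident", "H")]], [[("ident", "thm1")], [("ident", "thm2")]])

def Spec_prep_tac (tactic : String) (lc : List (List (String × String))) (gc : List (List (String × String))) (out : List String) : Prop := out = prep_tac_alt tactic lc gc
instance (tactic : String) (lc : List (List (String × String))) (gc : List (List (String × String))) (out : List String) : Decidable (Spec_prep_tac tactic lc gc out) := by unfold Spec_prep_tac; infer_instance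

-- ===== CLAIM (what is proved, stated in full; the proofs are below) =====
def Claim_equal_prep_tac : Prop := ∀ (tactic : String) (lc : List (List (String × String))) (gc : List (List (String × String))), Dom_prep_tac tactic lc gc → Pre_prep_tac tactic lc gc → Spec_prep_tac tactic lc gc (prep_tac tactic lc gc)

-- ===== LEMMAS AND PROOFS =====

-- A's while loop starting at index i with n slots left produces exactly B's
-- structural recursion applied to the tail of the context from index i.
lemma prep_tacWhile_eq_fill (tactic : String) (ctx : List (List (String × String))) :
    ∀ (n i : Nat) (res : List String),
      prep_tacWhile tactic ctx (res.length + n) i res = res ++ prep_tacFill tactic n (ctx.drop i) := by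
  intro n
  induction n with
  | zero =>
    intro i res
    rw [prep_tacWhile]
    simp [prep_tacFill]
  | succ n ih =>
    intro i res
    rw [prep_tacWhile, if_pos (by omega)]
    by_cases h : i < ctx.length
    · have hdrop : ctx.drop i = ctx[i] :: ctx.drop (i + 1) :=
        (List.getElem_cons_drop h).symm
      have := ih (i + 1) (res ++ [tactic ++ " " ++ ((List.lookup "ident" ctx[i]).getD "")])
      simp only [List.length_append, List.length_singleton] at this ⊢
      rw [dif_pos h]
      rw [show res.length + 1 + n = res.length + (n + 1) by omega] at this
      rw [this, hdrop, prep_tacFill]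
      simp [List.append_assoc]
    · have hdrop : ctx.drop i = [] := List.drop_eq_nil_of_le (by omega)
      have hdrop' : ctx.drop (i + 1) = [] := List.drop_eq_nil_of_le (by omega)
      have := ih (i + 1) (res ++ [tactic ++ " NONE"])
      simp only [List.length_append, List.length_singleton] at this
      rw [dif_neg h]
      rw [show res.length + 1 + n = res.length + (n + 1) by omega] at this
      rw [this, hdrop, hdrop', prep_tacFill]
      cases n with
      | zero => simp [prep_tacFill]
      | succ m => simp [prep_tacFill, List.replicate_succ, List.append_assoc]

lemma prep_tacWhile_eq_fill0 (tactic : String) (ctx : List (List (String × String))) (bound : Nat) :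
    prep_tacWhile tactic ctx bound 0 [] = prep_tacFill tactic bound ctx := by
  have h := prep_tacWhile_eq_fill tactic ctx bound 0 []
  simpa using h

-- ===== VERDICT (by name: the statement is the Claim_ definition above) =====
theorem prep_tac_spec : Claim_equal_prep_tac := by
  intro tactic lc gc _ _
  unfold Spec_prep_tac prep_tac prep_tac_alt
  split_ifs with h1 h2
  · exact prep_tacWhile_eq_fill0 tactic gc 10
  · exact prep_tacWhile_eq_fill0 tactic lc 20
  · rfl
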